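-- pv_equiv track=rewrite | github.com/WayneLin92/AlgTop | other/specseq.py | prod_mons
-- ===== SOURCE A (Python) =====
-- def prod_mons(mon1, mon2):
--     """ return the product of two monomials as a monomial """
--     mon_pro = dict(mon1)
--     for gen, exp in mon2:
--         if gen in mon_pro:
--             mon_pro[gen] += exp
--         else:
--             mon_pro[gen] = exp
--     return tuple(sorted(mon_pro.items()))
-- ===== SOURCE B (Python) =====
-- def prod_mons(mon1, mon2):
--     """ return the product of two monomials as a monomial """
--     out = []
--     for gen, exp in sorted(list(dict(mon1).items()) + list(mon2)):
--         if out and out[-1][0] == gen: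
--             out[-1] = (gen, out[-1][1] + exp)
--         else:
--             out.append((gen, exp))
--     return tuple(out)
-- ===== Notes on version B (the rewrite author's own statement) =====
-- stated objective: alternative
-- what changed: A accumulates mon2 into a dict built from mon1 (per-element lookup and update) and sorts the dict items at the end; B sorts the combined pair list once and sums equal generators in a single adjacent-merge pass, with no dict accumulation.
import Mathlib
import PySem

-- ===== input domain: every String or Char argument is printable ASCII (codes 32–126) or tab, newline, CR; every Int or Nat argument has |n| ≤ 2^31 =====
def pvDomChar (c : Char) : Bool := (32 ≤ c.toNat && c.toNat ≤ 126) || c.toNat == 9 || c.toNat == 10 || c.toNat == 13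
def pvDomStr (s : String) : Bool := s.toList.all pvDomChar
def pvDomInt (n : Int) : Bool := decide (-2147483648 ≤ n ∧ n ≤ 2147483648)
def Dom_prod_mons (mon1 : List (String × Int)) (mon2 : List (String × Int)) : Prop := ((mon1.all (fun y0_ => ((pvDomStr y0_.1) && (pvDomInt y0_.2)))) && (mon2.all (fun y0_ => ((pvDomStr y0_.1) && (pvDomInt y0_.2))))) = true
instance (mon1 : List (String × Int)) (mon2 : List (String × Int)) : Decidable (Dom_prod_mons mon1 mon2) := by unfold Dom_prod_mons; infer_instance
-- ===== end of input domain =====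

-- B replaces A's per-element dict accumulation of mon2 by one sort of the combined pair list
-- followed by a linear adjacent-merge pass; objective: alternative — same cost, no dict accumulation.

-- ===== PORT A =====
def prod_mons (mon1 : List (String × Int)) (mon2 : List (String × Int)) : List (String × Int) :=
  let monPro := mon2.foldl (fun d p =>
      if d.contains p.1 then d.insert p.1 (d.getD p.1 0 + p.2)
      else d.insert p.1 p.2) (PySem.Dict.ofList mon1)
  PySem.List.sorted2 monPro.items (fun p => p.1) (fun p => p.2)

-- ===== PORT B =====
-- B's loop body: merge the pair into the last output slot if the generator matches, else append
def mergeStep (out : List (String × Int)) (p : String × Int) : List (String × Int) :=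
  match out.getLast? with
  | some q => if q.1 = p.1 then out.dropLast ++ [(p.1, q.2 + p.2)] else out ++ [p]
  | none => out ++ [p]

def prod_mons_alt (mon1 : List (String × Int)) (mon2 : List (String × Int)) : List (String × Int) :=
  (PySem.List.sorted2 ((PySem.Dict.ofList mon1).items ++ mon2)
      (fun p => p.1) (fun p => p.2)).foldl mergeStep []

-- ===== PRECONDITION & SPEC =====
def Spec_prod_mons (mon1 : List (String × Int)) (mon2 : List (String × Int)) (out : List (String × Int)) : Prop := out = prod_mons_alt mon1 mon2
instance (mon1 : List (String × Int)) (mon2 : List (String × Int)) (out : List (String × Int)) : Decidable (Spec_prod_mons mon1 mon2 out) := by unfold Spec_prod_mons; infer_instance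

-- ===== CLAIM (what is proved, stated in full; the proofs are below) =====
def Claim_equal_prod_mons : Prop := ∀ (mon1 : List (String × Int)) (mon2 : List (String × Int)), Dom_prod_mons mon1 mon2 → Spec_prod_mons mon1 mon2 (prod_mons mon1 mon2)

-- ===== LEMMAS AND PROOFS =====

def sumAt (l : List (String × Int)) (k : String) : Int :=
  (l.map (fun p => if p.1 = k then p.2 else 0)).sum

theorem sumAt_eq_zero_of_not_mem (l : List (String × Int)) (k : String)
    (h : k ∉ l.map Prod.fst) : sumAt l k = 0 := by
  induction l with
  | nil => simp [sumAt]
  | cons q t ih =>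
    simp only [List.map_cons, List.mem_cons, not_or] at h
    have h1 : ¬ q.1 = k := fun hq => h.1 hq.symm
    simp only [sumAt, List.map_cons, List.sum_cons, if_neg h1, zero_add]
    exact ih h.2

theorem mergeStep_concat (acc : List (String × Int)) (r p : String × Int) :
    mergeStep (acc ++ [r]) p
      = if r.1 = p.1 then acc ++ [(p.1, r.2 + p.2)] else (acc ++ [r]) ++ [p] := by
  simp [mergeStep]

theorem foldl_mergeStep_pull (l : List (String × Int)) :
    ∀ (acc : List (String × Int)) (r : String × Int),
    List.foldl mergeStep (acc ++ [r]) l = acc ++ List.foldl mergeStep [r] l := by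
  induction l with
  | nil => intro acc r; simp
  | cons p t ih =>
    intro acc r
    rw [List.foldl_cons, List.foldl_cons, mergeStep_concat]
    have hr : mergeStep [r] p = if r.1 = p.1 then [(p.1, r.2 + p.2)] else [r, p] := by
      simpa using mergeStep_concat [] r p
    rw [hr]
    by_cases h : r.1 = p.1
    · simp only [if_pos h]
      exact ih acc _
    · simp only [if_neg h]
      rw [ih (acc ++ [r]) p]
      have h2 : ([r, p] : List (String × Int)) = [r] ++ [p] := rfl
      rw [h2, ih [r] p]
      simp

theorem setOfList_cons_cons_self (a : String) (l : List String) :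
    PySem.Set.ofList (a :: a :: l) = PySem.Set.ofList (a :: l) := by
  simp [PySem.Set.ofList_eq_foldl, PySem.Set.add]

theorem setOfList_cons_of_not_mem (a : String) (l : List String) (h : a ∉ l) :
    PySem.Set.ofList (a :: l) = a :: PySem.Set.ofList l := by
  have key : ∀ (l : List String) (s : List String) (a : String), a ∉ l →
      List.foldl PySem.Set.add (a :: s) l = a :: List.foldl PySem.Set.add s l := by
    intro l
    induction l with
    | nil => intro s a _; rfl
    | cons x t ih =>
      intro s a ha
      simp only [List.mem_cons, not_or] at ha
      have hxa : (x == a) = false := beq_eq_false_iff_ne.mpr (fun h2 => ha.1 h2.symm)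
      have hc : PySem.Set.contains (a :: s) x = PySem.Set.contains s x := by
        simp only [PySem.Set.contains, List.contains_cons, hxa, Bool.false_or]
      have : PySem.Set.add (a :: s) x = a :: PySem.Set.add s x := by
        simp only [PySem.Set.add, hc]
        split <;> simp
      rw [List.foldl_cons, this, List.foldl_cons]
      exact ih _ _ ha.2
  rw [PySem.Set.ofList_eq_foldl, PySem.Set.ofList_eq_foldl, List.foldl_cons]
  have : PySem.Set.add ([] : List String) a = [a] := by simp [PySem.Set.add]
  rw [this]
  exact key l [] a h

theorem sumAt_cons (q : String × Int) (l : List (String × Int)) (k : String) :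
    sumAt (q :: l) k = (if q.1 = k then q.2 else 0) + sumAt l k := by
  simp [sumAt]

theorem sumAt_perm {l l' : List (String × Int)} (h : l.Perm l') (k : String) :
    sumAt l k = sumAt l' k := List.Perm.sum_eq (h.map _)

theorem sorted2_eq_sorted_lex (xs : List (String × Int)) :
    PySem.List.sorted2 xs (fun p => p.1) (fun p => p.2)
      = PySem.List.sorted xs (fun p => (toLex (p.1, p.2) : String ×ₗ Int)) := by
  rw [PySem.List.sorted_eq_foldl_insertBy]
  show List.foldl _ [] xs = _
  congr 1
  funext acc x
  congr 1
  funext a b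
  rcases lt_trichotomy a.1 b.1 with h | h | h
  · simp [h, Prod.Lex.lt_iff, not_lt.mpr (le_of_lt h)]
  · simp [h, Prod.Lex.lt_iff]
  · simp [h, Prod.Lex.lt_iff, not_lt.mpr (le_of_lt h), ne_of_gt h]

theorem setOfList_sublist (xs : List String) : (PySem.Set.ofList xs).Sublist xs := by
  have key : ∀ (l s : List String), ∃ r, List.foldl PySem.Set.add s l = s ++ r ∧ r.Sublist l := by
    intro l
    induction l with
    | nil => intro s; exact ⟨[], by simp⟩
    | cons x t ih =>
      intro s
      rw [List.foldl_cons]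
      by_cases h : x ∈ s
      · have : PySem.Set.add s x = s := by simp [PySem.Set.add, PySem.Set.contains, h]
        rw [this]
        obtain ⟨r, hr, hs⟩ := ih s
        exact ⟨r, hr, hs.cons x⟩
      · have : PySem.Set.add s x = s ++ [x] := by simp [PySem.Set.add, PySem.Set.contains, h]
        rw [this]
        obtain ⟨r, hr, hs⟩ := ih (s ++ [x])
        exact ⟨x :: r, by simpa using hr, hs.cons₂ x⟩
  obtain ⟨r, hr, hs⟩ := key xs []
  rw [PySem.Set.ofList_eq_foldl, hr]
  simpa using hs

theorem foldl_mergeStep_sorted (t : List (String × Int)) :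
    ∀ r : String × Int, List.Pairwise (fun a b => a.1 ≤ b.1) (r :: t) →
    List.foldl mergeStep [r] t
      = (PySem.Set.ofList ((r :: t).map Prod.fst)).map (fun k => (k, sumAt (r :: t) k)) := by
  induction t with
  | nil =>
    intro r _
    have h1 : PySem.Set.ofList [r.1] = [r.1] := by
      simp [PySem.Set.ofList_eq_foldl, PySem.Set.add, PySem.Set.contains]
    simp [h1, sumAt]
  | cons p t ih =>
    intro r hpair
    have hrp : r.1 ≤ p.1 := (List.pairwise_cons.mp hpair).1 p (by simp)
    have hpt : List.Pairwise (fun a b : String × Int => a.1 ≤ b.1) (p :: t) :=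
      (List.pairwise_cons.mp hpair).2
    have hstep : mergeStep [r] p = if r.1 = p.1 then [(p.1, r.2 + p.2)] else [r, p] := by
      simpa using mergeStep_concat [] r p
    rw [List.foldl_cons, hstep]
    by_cases h : r.1 = p.1
    · rw [if_pos h]
      have hpair' : List.Pairwise (fun a b : String × Int => a.1 ≤ b.1)
          ((p.1, r.2 + p.2) :: t) := by
        refine List.pairwise_cons.mpr ⟨?_, (List.pairwise_cons.mp hpt).2⟩
        intro x hx
        exact (List.pairwise_cons.mp hpt).1 x hx
      rw [ih _ hpair']
      have hkeys : PySem.Set.ofList (((p.1, r.2 + p.2) :: t).map Prod.fst)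
          = PySem.Set.ofList ((r :: p :: t).map Prod.fst) := by
        simp only [List.map_cons]
        rw [h, setOfList_cons_cons_self]
      rw [hkeys]
      apply List.map_congr_left
      intro k _
      have : sumAt ((p.1, r.2 + p.2) :: t) k = sumAt (r :: p :: t) k := by
        rw [sumAt_cons, sumAt_cons, sumAt_cons, h]
        split_ifs <;> ring
      rw [this]
    · rw [if_neg h]
      have h2 : ([r, p] : List (String × Int)) = [r] ++ [p] := rfl
      rw [h2, foldl_mergeStep_pull, ih p hpt]
      have hnot : r.1 ∉ ((p :: t).map Prod.fst) := by
        intro hmem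
        simp only [List.map_cons, List.mem_cons, List.mem_map] at hmem
        rcases hmem with h1 | ⟨x, hx, hx1⟩
        · exact h h1
        · have h3 : p.1 ≤ x.1 := (List.pairwise_cons.mp hpt).1 x hx
          have h4 : r.1 < p.1 := lt_of_le_of_ne hrp h
          have h5 : r.1 < x.1 := lt_of_lt_of_le h4 h3
          rw [hx1] at h5
          exact lt_irrefl _ h5
      have hnot' : r.1 ∉ (p.1 :: t.map Prod.fst) := by simpa using hnot
      simp only [List.map_cons, List.singleton_append]
      rw [setOfList_cons_of_not_mem _ _ hnot', List.map_cons]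
      congr 1
      · rw [sumAt_cons, if_pos rfl, sumAt_eq_zero_of_not_mem _ _ hnot, add_zero]
      · apply List.map_congr_left
        intro k hk
        have hk' : k ∈ (p.1 :: t.map Prod.fst) := (PySem.Set.mem_ofList _ _).mp hk
        have hne : ¬ r.1 = k := fun he => hnot' (he ▸ hk')
        rw [sumAt_cons (r), if_neg hne, zero_add]


-- the exponent of the first pair of l carrying generator k (0 if none)
def firstVal (l : List (String × Int)) (k : String) : Int :=
  match l.find? (fun p => p.1 == k) with
  | some p => p.2
  | none => 0

-- the value both programs compute for generator k
def vTot (mon1 mon2 : List (String × Int)) (k : String) : Int :=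
  firstVal mon1.reverse k + sumAt mon2 k

-- the canonical shape of both outputs: the distinct generators sorted, each paired with v
def canonV (keys : List String) (v : String → Int) : List (String × Int) :=
  (PySem.List.sorted (PySem.Set.ofList keys) (fun x => x)).map (fun k => (k, v k))

theorem canonV_congr (keys keys' : List String) (v v' : String → Int)
    (hm : ∀ k, k ∈ keys ↔ k ∈ keys') (hv : ∀ k, v k = v' k) :
    canonV keys v = canonV keys' v' := by
  unfold canonV
  have hs : PySem.List.sorted (PySem.Set.ofList keys') (fun x => x)
      = PySem.List.sorted (PySem.Set.ofList keys) (fun x => x) := by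
    apply PySem.List.sorted_eq_of_perm_of_pairwise_lt
    · refine List.Perm.trans (PySem.List.sorted_perm _ _ false) ?_
      apply List.perm_of_nodup_nodup_toFinset_eq
          (PySem.Set.nodup_ofList _) (PySem.Set.nodup_ofList _)
      ext k
      simp only [List.mem_toFinset, PySem.Set.mem_ofList]
      exact hm k
    · exact PySem.List.sorted_ofList_pairwise_lt keys
  rw [← hs]
  apply List.map_congr_left
  intro k _
  rw [hv k]

-- grouping a key-sorted pair list gives the canonical monomial of that list
theorem group_sorted_eq (l : List (String × Int)) :
    (PySem.List.sorted2 l (fun p => p.1) (fun p => p.2)).foldl mergeStep []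
      = canonV (l.map Prod.fst) (fun k => sumAt l k) := by
  rw [sorted2_eq_sorted_lex]
  set S := PySem.List.sorted l (fun p => (toLex (p.1, p.2) : String ×ₗ Int)) with hS
  have hperm : S.Perm l := PySem.List.sorted_perm l _ false
  have hpair : S.Pairwise (fun a b => a.1 ≤ b.1) := by
    have := PySem.List.sorted_pairwise l (fun p => (toLex (p.1, p.2) : String ×ₗ Int))
    refine this.imp ?_
    intro a b hab
    rcases Prod.Lex.le_iff.mp hab with h | h
    · exact le_of_lt h
    · exact le_of_eq h.1
  have hsum : ∀ k, sumAt S k = sumAt l k := fun k => sumAt_perm hperm k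
  have hkeys : PySem.List.sorted (PySem.Set.ofList (l.map Prod.fst)) (fun x => x)
      = PySem.Set.ofList (S.map Prod.fst) := by
    apply PySem.List.sorted_eq_of_perm_of_pairwise_lt
    · apply List.perm_of_nodup_nodup_toFinset_eq
          (PySem.Set.nodup_ofList _) (PySem.Set.nodup_ofList _)
      ext k
      simp only [List.mem_toFinset, PySem.Set.mem_ofList]
      exact List.Perm.mem_iff (hperm.map Prod.fst)
    · have h1 : (S.map Prod.fst).Pairwise (· ≤ ·) := List.pairwise_map.mpr hpair
      have h2 : (PySem.Set.ofList (S.map Prod.fst)).Pairwise (· ≤ ·) :=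
        List.Pairwise.sublist (setOfList_sublist _) h1
      have h3 : (PySem.Set.ofList (S.map Prod.fst)).Pairwise (· ≠ ·) :=
        PySem.Set.nodup_ofList _
      exact (h2.and h3).imp (fun hab => lt_of_le_of_ne hab.1 hab.2)
  cases hSc : S with
  | nil =>
    have hl : l = [] :=
      (PySem.List.sorted_eq_nil_iff l (fun p => (toLex (p.1, p.2) : String ×ₗ Int)) false).mp hSc
    rw [hl] at hkeys ⊢
    simp only [canonV, List.foldl_nil]
    rw [hkeys, hSc]
    simp
  | cons r t =>
    have hstep0 : mergeStep [] r = [r] := by simp [mergeStep]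
    rw [List.foldl_cons, hstep0, foldl_mergeStep_sorted t r (hSc ▸ hpair)]
    rw [canonV, hkeys, hSc]
    apply List.map_congr_left
    intro k _
    rw [← hSc, hsum k]

-- ---- shared dict facts ----
theorem getD_foldl_insert_pairs_last (l : List (String × Int)) (d : PySem.Dict String Int)
    (k : String) :
    (l.foldl (fun acc p => acc.insert p.1 p.2) d).getD k 0
      = match l.reverse.find? (fun p => p.1 == k) with
        | some p => p.2
        | none => d.getD k 0 := by
  induction l using List.reverseRecOn with
  | nil => simp
  | append_singleton l p ih =>
    rw [List.foldl_append, List.foldl_cons, List.foldl_nil, PySem.Dict.getD_insert]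
    have hrev : (l ++ [p]).reverse = p :: l.reverse := by simp
    rw [hrev]
    by_cases hk : k = p.1
    · rw [if_pos hk]
      have : List.find? (fun q => q.1 == k) (p :: l.reverse) = some p := by
        simp [beq_iff_eq.mpr hk.symm]
      rw [this]
    · rw [if_neg hk]
      have hpk : (p.1 == k) = false := beq_eq_false_iff_ne.mpr (fun h => hk h.symm)
      have : List.find? (fun q => q.1 == k) (p :: l.reverse)
          = List.find? (fun q => q.1 == k) l.reverse := by
        simp [hpk]
      rw [this, ih]

theorem getD_ofList_eq_firstVal (l : List (String × Int)) (k : String) :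
    (PySem.Dict.ofList l).getD k 0 = firstVal l.reverse k := by
  show (List.foldl (fun acc p => acc.insert p.1 p.2) PySem.Dict.empty l).getD k 0 = _
  rw [getD_foldl_insert_pairs_last]
  cases h : l.reverse.find? (fun p => p.1 == k) with
  | none => simp [firstVal, h]
  | some p => simp [firstVal, h]

theorem keys_ofList (mon1 : List (String × Int)) :
    (PySem.Dict.ofList mon1).keys = PySem.Set.ofList (mon1.map Prod.fst) := by
  show (List.foldl (fun acc p => acc.insert p.1 p.2) PySem.Dict.empty mon1).keys = _
  rw [PySem.Dict.keys_foldl_insert_key mon1 Prod.fst (fun _ p => p.2) PySem.Dict.empty]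
  simp [PySem.Set.update, PySem.Set.ofList_eq_foldl]

-- sumAt over a map with distinct keys picks out the single value
theorem sumAt_map_nodup (l : List String) (f : String → Int) (hnd : l.Nodup) (k : String) :
    sumAt (l.map (fun x => (x, f x))) k = if k ∈ l then f k else 0 := by
  induction l with
  | nil => simp [sumAt]
  | cons x t ih =>
    have hnd' : t.Nodup := (List.nodup_cons.mp hnd).2
    have hx : x ∉ t := (List.nodup_cons.mp hnd).1
    rw [List.map_cons, sumAt_cons, ih hnd']
    by_cases h : x = k
    · subst h
      simp [hx]
    · simp only [if_neg h, List.mem_cons, zero_add]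
      by_cases h2 : k ∈ t
      · rw [if_pos h2, if_pos (Or.inr h2)]
      · rw [if_neg h2, if_neg (by rintro (h3 | h3); exact h h3.symm; exact h2 h3)]

-- sumAt over the items of dict(mon1) is its getD value
theorem sumAt_items_ofList (mon1 : List (String × Int)) (k : String) :
    sumAt (PySem.Dict.ofList mon1).items k = (PySem.Dict.ofList mon1).getD k 0 := by
  set d := PySem.Dict.ofList mon1 with hd
  have hnodup : d.keys.Nodup := by
    rw [hd, keys_ofList]; exact PySem.Set.nodup_ofList _
  rw [PySem.Dict.items_eq_map_keys d hnodup 0, sumAt_map_nodup _ _ hnodup]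
  by_cases h : k ∈ d.keys
  · rw [if_pos h]
  · rw [if_neg h, PySem.Dict.getD_of_not_contains]
    rw [Bool.eq_false_iff]
    intro hc
    exact h ((PySem.Dict.contains_iff_mem_keys d k).mp hc)

theorem mem_items_keys_ofList (mon1 : List (String × Int)) (k : String) :
    k ∈ (PySem.Dict.ofList mon1).items.map Prod.fst ↔ k ∈ mon1.map Prod.fst := by
  set d := PySem.Dict.ofList mon1 with hd
  have hnodup : d.keys.Nodup := by
    rw [hd, keys_ofList]; exact PySem.Set.nodup_ofList _
  rw [PySem.Dict.items_eq_map_keys d hnodup 0]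
  have : (d.keys.map (fun k => (k, d.getD k 0))).map Prod.fst = d.keys := by
    rw [List.map_map]; exact List.map_id _
  rw [this, hd, keys_ofList, PySem.Set.mem_ofList]

theorem prod_mons_alt_eq (mon1 mon2 : List (String × Int)) :
    prod_mons_alt mon1 mon2 = canonV ((mon1 ++ mon2).map Prod.fst) (vTot mon1 mon2) := by
  unfold prod_mons_alt
  rw [group_sorted_eq]
  apply canonV_congr
  · intro k
    simp only [List.map_append, List.mem_append]
    rw [mem_items_keys_ofList]
  · intro k
    have : sumAt ((PySem.Dict.ofList mon1).items ++ mon2) k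
        = sumAt (PySem.Dict.ofList mon1).items k + sumAt mon2 k := by simp [sumAt]
    rw [this, sumAt_items_ofList, getD_ofList_eq_firstVal, vTot]

-- ---- A side ----
theorem stepA_eq (d : PySem.Dict String Int) (p : String × Int) :
    (if d.contains p.1 then d.insert p.1 (d.getD p.1 0 + p.2) else d.insert p.1 p.2)
      = d.insert p.1 (d.getD p.1 0 + p.2) := by
  by_cases h : d.contains p.1 = true
  · rw [if_pos h]
  · rw [if_neg h]
    rw [PySem.Dict.getD_of_not_contains d 0 (Bool.not_eq_true _ ▸ h), zero_add]

theorem getD_foldl_insert_add (m2 : List (String × Int)) :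
    ∀ (d : PySem.Dict String Int) (k : String),
    (m2.foldl (fun d p => d.insert p.1 (d.getD p.1 0 + p.2)) d).getD k 0
      = d.getD k 0 + sumAt m2 k := by
  induction m2 with
  | nil => intro d k; simp [sumAt]
  | cons p t ih =>
    intro d k
    rw [List.foldl_cons, ih, sumAt_cons, PySem.Dict.getD_insert]
    split_ifs with h1 h2 h2
    · rw [h1] at h2 ⊢; ring
    · exact absurd h1.symm h2
    · exact absurd h2.symm h1
    · ring

theorem prod_mons_eq (mon1 mon2 : List (String × Int)) :
    prod_mons mon1 mon2 = canonV ((mon1 ++ mon2).map Prod.fst) (vTot mon1 mon2) := by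
  unfold prod_mons
  have hstep : (fun (d : PySem.Dict String Int) (p : String × Int) =>
      if d.contains p.1 then d.insert p.1 (d.getD p.1 0 + p.2) else d.insert p.1 p.2)
      = fun d p => d.insert p.1 (d.getD p.1 0 + p.2) := by
    funext d p; exact stepA_eq d p
  rw [hstep]
  set d := mon2.foldl (fun d p => d.insert p.1 (d.getD p.1 0 + p.2)) (PySem.Dict.ofList mon1) with hd
  show PySem.List.sorted2 d.items (fun p => p.1) (fun p => p.2) = _
  have hkeys : d.keys = PySem.Set.ofList ((mon1 ++ mon2).map Prod.fst) := by
    rw [hd, PySem.Dict.keys_foldl_insert_key mon2 Prod.fst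
          (fun d p => d.getD p.1 0 + p.2) (PySem.Dict.ofList mon1), keys_ofList]
    rw [PySem.Set.ofList_eq_foldl, PySem.Set.ofList_eq_foldl, List.map_append, List.foldl_append]
    rfl
  have hnodup : d.keys.Nodup := by
    rw [hkeys]; exact PySem.Set.nodup_ofList _
  have hval : ∀ k, d.getD k 0 = vTot mon1 mon2 k := by
    intro k
    rw [hd, getD_foldl_insert_add, getD_ofList_eq_firstVal, vTot]
  have hitems : d.items = (PySem.Set.ofList ((mon1 ++ mon2).map Prod.fst)).map
      (fun k => (k, vTot mon1 mon2 k)) := by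
    rw [PySem.Dict.items_eq_map_keys d hnodup 0, hkeys]
    exact List.map_congr_left (fun k _ => by rw [hval k])
  rw [hitems, sorted2_eq_sorted_lex]
  have hperm : (canonV ((mon1 ++ mon2).map Prod.fst) (vTot mon1 mon2)).Perm
      ((PySem.Set.ofList ((mon1 ++ mon2).map Prod.fst)).map
        (fun k => (k, vTot mon1 mon2 k))) :=
    (PySem.List.sorted_perm _ _ false).map _
  have hpairC : (canonV ((mon1 ++ mon2).map Prod.fst) (vTot mon1 mon2)).Pairwise
      (fun a b : String × Int =>
        (toLex (a.1, a.2) : String ×ₗ Int) < toLex (b.1, b.2)) := by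
    rw [canonV, List.pairwise_map]
    refine (PySem.List.sorted_ofList_pairwise_lt ((mon1 ++ mon2).map Prod.fst)).imp ?_
    intro a b hab
    exact Prod.Lex.lt_iff.mpr (Or.inl hab)
  exact PySem.List.sorted_eq_of_perm_of_pairwise_lt _ _
    (fun p : String × Int => (toLex (p.1, p.2) : String ×ₗ Int)) hperm hpairC

-- ===== VERDICT (by name: the statement is the Claim_ definition above) =====
theorem prod_mons_spec : Claim_equal_prod_mons := by
  intro mon1 mon2 _
  unfold Spec_prod_mons
  rw [prod_mons_eq, prod_mons_alt_eq]
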